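-- pv_equiv track=rewrite | github.com/toshikish/atcoder | abc/abc215_c_permutation.py | f
-- ===== SOURCE A (Python) =====
-- from math import factorial, prod
--
-- def f(k, D):
--     if sum(D.values()) == 1:
--         for l in D.keys():
--             if D[l] == 1:
--                 return l
--     t = 0
--     for l in sorted(D.keys()):
--         if D[l] == 0:
--             del D[l]
--             continue
--         D[l] -= 1
--         p = factorial(sum(D.values())) \
--             // prod(factorial(v) for v in D.values())
--         if k <= t + p:
--             return l + f(k - t, D)
--         D[l] += 1
--         t += p
-- ===== SOURCE B (Python) =====
-- from math import factorial, prod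
--
-- # Unranking loop: sort the positive (letter, count) items once, compute the
-- # multinomial once, then pick each position updating the multinomial
-- # incrementally (perms starting with l = m * c_l // n).
-- # Note: A mutates its dict argument in place; B does not (return value only).
-- def f(k, D):
--     counts = [(l, c) for l, c in sorted(D.items(), key=lambda t: t[0]) if c]
--     n = sum(c for _, c in counts)
--     m = factorial(n) // prod(factorial(c) for _, c in counts)
--     out = []
--     while n > 1:
--         for i, (l, c) in enumerate(counts):
--             p = m * c // n
--             if k <= p:
--                 out.append(l)
--                 m = p
--                 n -= 1
--                 counts[i:i + 1] = [] if c == 1 else [(l, c - 1)]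
--                 break
--             k -= p
--         else:
--             return ''.join(out)  # k exceeds the number of permutations (outside Pre_)
--     return ''.join(out) + (counts[0][0] if counts else '')
-- ===== Notes on version B (the rewrite author's own statement) =====
-- stated objective: faster
-- what changed: Replaces A's per-candidate recomputation of sorted(D.keys()) and of factorial(sum)//prod(factorials) inside a recursion that mutates the dict by an iterative unranking loop that sorts the positive (letter,count) items once, computes the multinomial coefficient once, and updates it incrementally as p = m*c//n per candidate.
-- outside the precondition, e.g. on f(1, {'a': 1, 'b': -1, 'c': 1}): A returns 'a', B raises ValueError
import Mathlib
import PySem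

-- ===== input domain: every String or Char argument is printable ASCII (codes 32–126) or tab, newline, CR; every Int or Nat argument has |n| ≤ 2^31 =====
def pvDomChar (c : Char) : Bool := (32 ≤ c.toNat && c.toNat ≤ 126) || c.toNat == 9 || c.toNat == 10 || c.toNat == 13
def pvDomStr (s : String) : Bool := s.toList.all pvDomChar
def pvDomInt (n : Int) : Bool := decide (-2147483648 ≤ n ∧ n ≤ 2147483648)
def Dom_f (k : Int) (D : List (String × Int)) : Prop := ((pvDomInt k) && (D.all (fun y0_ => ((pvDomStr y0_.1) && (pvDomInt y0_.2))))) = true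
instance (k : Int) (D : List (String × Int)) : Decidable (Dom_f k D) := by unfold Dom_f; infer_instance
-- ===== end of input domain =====

-- B re-implements A's k-th-multiset-permutation unranking as a single loop that sorts the
-- positive items once, computes the multinomial once and maintains it incrementally
-- (measured faster; constant/asymptotic: no factorial recomputation per candidate).
-- NOTE: A mutates its dict argument in place; B does not — the equivalence proved here is
-- about the RETURN value only.

-- math.factorial; Python raises ValueError for a negative argument (excluded by Pre_f),
-- the port returns 0 there.
def pyFact (v : Int) : Int := if v < 0 then 0 else ((Nat.factorial v.toNat : Nat) : Int)

-- ===== PORT A =====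
-- the base-case scan `for l in D.keys(): if D[l] == 1: return l`
def firstOne : List String → PySem.Dict String Int → Option String
  | [], _ => none
  | l :: ls, d => if d.getD l 0 = 1 then some l else firstOne ls d

-- the `for l in sorted(D.keys())` loop; `recur` is the recursive call f(k - t, D).
-- Falling off the loop is Python's implicit `return None` (excluded by Pre_f): port returns "".
def innerA (recur : Int → PySem.Dict String Int → String) :
    List String → Int → PySem.Dict String Int → Int → String
  | [], _, _, _ => ""
  | l :: ls, k, d, t =>
    if d.getD l 0 = 0 then innerA recur ls k (d.erase l) t
    else
      let d' := d.insert l (d.getD l 0 - 1)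
      let p := PySem.Int.floordiv (pyFact d'.values.sum) ((d'.values.map pyFact).prod)
      if k ≤ t + p then l ++ recur (k - t) d'
      else innerA recur ls k (d'.insert l (d'.getD l 0 + 1)) (t + p)

-- f's body; the fuel only realises the recursion (depth = remaining total count inside Pre_f)
def goA : Nat → Int → PySem.Dict String Int → String
  | 0, _, _ => ""
  | fa + 1, k, d =>
    let cont := innerA (goA fa) (PySem.List.sorted d.keys (fun x => x) false) k d 0
    if d.values.sum = 1 then
      match firstOne d.keys d with
      | some l => l
      | none => cont
    else cont

def f (k : Int) (D : List (String × Int)) : String :=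
  let d := PySem.Dict.ofList D
  goA ((d.values.map Int.toNat).sum + 1) k d

-- ===== PORT B =====
-- one scan of the current (letter, count) list: p = m * c // n perms start with this letter;
-- pick the first letter with k <= p, else k -= p; returns (letter, new m, new k, new counts)
def innerB : Int → Int → Int → List (String × Int) →
    Option (String × Int × Int × List (String × Int))
  | _, _, _, [] => none
  | k, m, n, (l, c) :: rest =>
    let p := PySem.Int.floordiv (m * c) n
    if k ≤ p then some (l, p, k, if c = 1 then rest else (l, c - 1) :: rest)
    else
      match innerB (k - p) m n rest with
      | some (l', p', k', cs') => some (l', p', k', (l, c) :: cs')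
      | none => none

-- the `while n > 1` loop (fuel = initial n realises it)
def goB : Nat → Int → Int → Int → List (String × Int) → String → String
  | 0, _, _, _, _, out => out
  | fb + 1, n, m, k, cs, out =>
    if 1 < n then
      match innerB k m n cs with
      | some (l, p, k', cs') => goB fb (n - 1) p k' cs' (out ++ l)
      | none => out
    else out ++ (match cs with | (l, _) :: _ => l | [] => "")

def f_alt (k : Int) (D : List (String × Int)) : String :=
  let d := PySem.Dict.ofList D
  let cs := (PySem.List.sorted d.items (fun p => p.1) false).filter (fun p => !(p.2 == 0))
  let n := (cs.map (fun p => p.2)).sum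
  let m := PySem.Int.floordiv (pyFact n) ((cs.map (fun p => pyFact p.2)).prod)
  goB n.toNat n m k cs ""

-- ===== PRECONDITION & SPEC =====
-- n! / prod of factorials: the number of permutations of a multiset of counts
def natM (cs : List Nat) : Nat := Nat.factorial cs.sum / (cs.map Nat.factorial).prod

-- Pre_f excludes: negative counts (A raises ValueError in factorial, except that when the
-- signed sum of counts is 1 A accidentally returns a letter before reaching factorial);
-- an empty/all-zero dict and, for total ≥ 2, rank k above the number of permutations
-- (A falls off the loop and returns None, not a str).  For total = 1 every k is admitted
-- (A returns the single letter without looking at k, and so does B).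
def Pre_f (k : Int) (D : List (String × Int)) : Prop :=
  let d := PySem.Dict.ofList D
  (∀ p ∈ d.items, 0 ≤ p.2) ∧ 1 ≤ d.values.sum ∧
    (d.values.sum = 1 ∨ k ≤ (natM (d.values.map Int.toNat) : Int))
instance (k : Int) (D : List (String × Int)) : Decidable (Pre_f k D) := by
  unfold Pre_f; infer_instance

def pvWitness_f : Int × (List (String × Int)) := (3, [("a", 2), ("b", 1)])

def Spec_f (k : Int) (D : List (String × Int)) (out : String) : Prop := out = f_alt k D
instance (k : Int) (D : List (String × Int)) (out : String) : Decidable (Spec_f k D out) := by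
  unfold Spec_f; infer_instance

-- ===== CLAIM (what is proved, stated in full; the proofs are below) =====
def Claim_equal_f : Prop := ∀ (k : Int) (D : List (String × Int)), Dom_f k D → Pre_f k D → Spec_f k D (f k D)

-- ===== LEMMAS AND PROOFS =====

-- ---------- proof-side abbreviations ----------

def MInt (d : PySem.Dict String Int) : Int := (natM (d.values.map Int.toNat) : Int)

def csOf (ks : List String) (d : PySem.Dict String Int) : List (String × Int) :=
  (ks.map (fun l => (l, d.getD l 0))).filter (fun q => 0 < q.2)

def csCanon (d : PySem.Dict String Int) : List (String × Int) :=
  PySem.List.sorted (d.items.filter (fun q => 0 < q.2)) (fun q => q.1) false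

theorem prodFact_dvd (cs : List Nat) : (cs.map Nat.factorial).prod ∣ Nat.factorial cs.sum := by
  induction cs with
  | nil => simp
  | cons c rest ih =>
    simp only [List.map_cons, List.prod_cons, List.sum_cons]
    calc Nat.factorial c * (rest.map Nat.factorial).prod
        ∣ Nat.factorial c * Nat.factorial rest.sum := by
          exact Nat.mul_dvd_mul_left _ ih
      _ ∣ Nat.factorial (c + rest.sum) := Nat.factorial_mul_factorial_dvd_factorial_add c rest.sum

theorem key_div (c s P0 : Nat) (hc : 0 < c) (hP0 : 0 < P0)
    (h1 : Nat.factorial c * P0 ∣ Nat.factorial (c + s))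
    (h2 : Nat.factorial (c - 1) * P0 ∣ Nat.factorial (c - 1 + s)) :
    Nat.factorial (c + s) / (Nat.factorial c * P0) * c
      = (c + s) * (Nat.factorial (c - 1 + s) / (Nat.factorial (c - 1) * P0)) := by
  set m := Nat.factorial (c + s) / (Nat.factorial c * P0) with hm
  set q := Nat.factorial (c - 1 + s) / (Nat.factorial (c - 1) * P0) with hq
  have hm' : m * (Nat.factorial c * P0) = Nat.factorial (c + s) := Nat.div_mul_cancel h1
  have hq' : q * (Nat.factorial (c - 1) * P0) = Nat.factorial (c - 1 + s) := Nat.div_mul_cancel h2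
  have hfc : Nat.factorial c = c * Nat.factorial (c - 1) := by
    conv_lhs => rw [show c = (c - 1) + 1 by omega]
    rw [Nat.factorial_succ]; congr 1; omega
  have hns : c + s = (c - 1 + s) + 1 := by omega
  have key : m * c * (Nat.factorial (c - 1) * P0) = (c + s) * q * (Nat.factorial (c - 1) * P0) := by
    calc m * c * (Nat.factorial (c - 1) * P0) = m * (Nat.factorial c * P0) := by rw [hfc]; ring
      _ = Nat.factorial (c + s) := hm'
      _ = (c + s) * Nat.factorial (c - 1 + s) := by rw [hns, Nat.factorial_succ]
      _ = (c + s) * (q * (Nat.factorial (c - 1) * P0)) := by rw [hq']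
      _ = (c + s) * q * (Nat.factorial (c - 1) * P0) := by ring
  have hpos : 0 < Nat.factorial (c - 1) * P0 := Nat.mul_pos (Nat.factorial_pos _) hP0
  exact Nat.eq_of_mul_eq_mul_right hpos key

theorem sum_toNat_cast (vs : List Int) (h : ∀ v ∈ vs, 0 ≤ v) :
    ((vs.map Int.toNat).sum : Int) = vs.sum := by
  induction vs with
  | nil => simp
  | cons v rest ih =>
    simp only [List.map_cons, List.sum_cons, Nat.cast_add]
    rw [ih (fun x hx => h x (List.mem_cons_of_mem _ hx))]
    have := h v (List.mem_cons_self ..)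
    omega

theorem prod_pyFact_cast (vs : List Int) (h : ∀ v ∈ vs, 0 ≤ v) :
    (vs.map pyFact).prod = (((vs.map Int.toNat).map Nat.factorial).prod : Int) := by
  induction vs with
  | nil => simp
  | cons v rest ih =>
    simp only [List.map_cons, List.prod_cons, Nat.cast_mul]
    rw [ih (fun x hx => h x (List.mem_cons_of_mem _ hx))]
    have hv := h v (List.mem_cons_self ..)
    rw [pyFact, if_neg (by omega)]

theorem pA_eq_MInt (d : PySem.Dict String Int) (h : ∀ q ∈ d.items, (0:Int) ≤ q.2) :
    PySem.Int.floordiv (pyFact d.values.sum) ((d.values.map pyFact).prod) = MInt d := by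
  have hvn : ∀ v ∈ d.values, (0:Int) ≤ v := by
    intro v hv
    simp only [PySem.Dict.values, List.mem_map] at hv
    obtain ⟨q, hq, rfl⟩ := hv
    exact h q hq
  have hs : d.values.sum = ((d.values.map Int.toNat).sum : Int) := (sum_toNat_cast _ hvn).symm
  rw [prod_pyFact_cast _ hvn, hs, pyFact, if_neg (by omega), Int.toNat_natCast,
    PySem.Int.floordiv_natCast]
  rfl

theorem get?_split (d : PySem.Dict String Int) (l : String) (v : Int)
    (hnd : d.keys.Nodup) (h : d.get? l = some v) :
    ∃ pre post, d.items = pre ++ (l, v) :: post ∧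
      (∀ q ∈ pre, q.1 ≠ l) ∧ (∀ q ∈ post, q.1 ≠ l) := by
  obtain ⟨its⟩ := d
  induction its with
  | nil => simp [PySem.Dict.get?] at h
  | cons q rest ih =>
    rw [PySem.Dict.get?_mk_cons] at h
    by_cases hq : q.1 = l
    · simp only [hq, beq_self_eq_true, if_pos] at h
      obtain ⟨rfl⟩ : q.2 = v := by simpa using h
      refine ⟨[], rest, by simp [← hq], by simp, ?_⟩
      intro r hr hrl
      simp only [PySem.Dict.keys, List.map_cons, List.nodup_cons] at hnd
      exact hnd.1 (hq ▸ hrl ▸ List.mem_map_of_mem hr)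
    · rw [if_neg (by simpa using hq)] at h
      have hnd' : (PySem.Dict.mk (κ := String) (ν := Int) rest).keys.Nodup := by
        simp only [PySem.Dict.keys, List.map_cons, List.nodup_cons] at hnd
        exact hnd.2
      obtain ⟨pre, post, hit, hpre, hpost⟩ := ih hnd' h
      exact ⟨q :: pre, post, by simp at hit ⊢; exact hit,
        by intro r hr; rcases List.mem_cons.mp hr with rfl | hr; exact hq; exact hpre r hr, hpost⟩

theorem get?_erase_of_ne (d : PySem.Dict String Int) (l j : String) (hne : j ≠ l) :
    (d.erase l).get? j = d.get? j := by
  obtain ⟨its⟩ := d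
  induction its with
  | nil => simp [PySem.Dict.erase, PySem.Dict.get?]
  | cons q rest ih =>
    simp only [PySem.Dict.erase, List.filter_cons] at *
    by_cases hq : q.1 = l
    · rw [if_neg (by simp [hq])]
      rw [PySem.Dict.get?_mk_cons, if_neg (by simp [hq]; exact Ne.symm hne)]
      exact ih
    · rw [if_pos (by simp [hq])]
      rw [PySem.Dict.get?_mk_cons, PySem.Dict.get?_mk_cons]
      by_cases hqj : q.1 = j
      · simp [hqj]
      · rw [if_neg (by simpa using hqj), if_neg (by simpa using hqj)]
        exact ih

theorem keys_erase_filter (d : PySem.Dict String Int) (l : String) :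
    (d.erase l).keys = d.keys.filter (fun x => !(x == l)) := by
  simp only [PySem.Dict.erase, PySem.Dict.keys]
  rw [List.filter_map]
  rfl

theorem insert_existing_items (d : PySem.Dict String Int) (l : String) (v w : Int)
    (pre post : List (String × Int)) (hit : d.items = pre ++ (l, v) :: post)
    (hpre : ∀ q ∈ pre, q.1 ≠ l) (hpost : ∀ q ∈ post, q.1 ≠ l) :
    (d.insert l w).items = pre ++ (l, w) :: post := by
  have hc : d.contains l = true := by
    simp only [PySem.Dict.contains, hit, List.any_append, List.any_cons]
    simp
  simp only [PySem.Dict.insert, hc, if_pos, hit, List.map_append, List.map_cons]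
  have hmap : ∀ (xs : List (String × Int)), (∀ q ∈ xs, q.1 ≠ l) →
      xs.map (fun p => if (p.1 == l) = true then (l, w) else p) = xs := by
    intro xs hxs
    exact (List.map_congr_left (fun q hq => by
      rw [if_neg (by simpa using hxs q hq)]; rfl)).trans (List.map_id _)
  rw [hmap pre hpre, hmap post hpost]
  simp

theorem erase_items_of_split (d : PySem.Dict String Int) (l : String) (v : Int)
    (pre post : List (String × Int)) (hit : d.items = pre ++ (l, v) :: post)
    (hpre : ∀ q ∈ pre, q.1 ≠ l) (hpost : ∀ q ∈ post, q.1 ≠ l) :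
    (d.erase l).items = pre ++ post := by
  simp only [PySem.Dict.erase, hit, List.filter_append, List.filter_cons]
  rw [if_neg (by simp)]
  congr 1
  · exact List.filter_eq_self.mpr (fun q hq => by simpa using hpre q hq)
  · exact List.filter_eq_self.mpr (fun q hq => by simpa using hpost q hq)

theorem insert_self (d : PySem.Dict String Int) (l : String) (v : Int)
    (hnd : d.keys.Nodup) (h : d.get? l = some v) : d.insert l v = d := by
  obtain ⟨pre, post, hit, hpre, hpost⟩ := get?_split d l v hnd h
  apply PySem.Dict.ext
  rw [insert_existing_items d l v v pre post hit hpre hpost, hit]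

theorem csOf_congr (ks : List String) (d d' : PySem.Dict String Int)
    (h : ∀ j ∈ ks, d'.get? j = d.get? j) : csOf ks d' = csOf ks d := by
  unfold csOf
  congr 1
  exact List.map_congr_left (fun j hj => by rw [PySem.Dict.getD_eq_get?_getD, PySem.Dict.getD_eq_get?_getD, h j hj])

theorem firstOne_congr (ks : List String) (d d' : PySem.Dict String Int)
    (h : ∀ j ∈ ks, d'.get? j = d.get? j) : firstOne ks d' = firstOne ks d := by
  induction ks with
  | nil => rfl
  | cons l ls ih =>
    simp only [firstOne]
    rw [PySem.Dict.getD_eq_get?_getD, PySem.Dict.getD_eq_get?_getD, h l (List.mem_cons_self ..),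
      ih (fun j hj => h j (List.mem_cons_of_mem _ hj))]

theorem sorted_keys_pairwise (ks : List String) (h : ks.Nodup) :
    (PySem.List.sorted ks (fun x => x) false).Pairwise (· < ·) := by
  have h1 : (PySem.List.sorted ks (fun x => x) false).Pairwise (· ≤ ·) :=
    PySem.List.sorted_pairwise ks (fun x => x) 
  have h2 : (PySem.List.sorted ks (fun x => x) false).Nodup :=
    (PySem.List.sorted_perm ks (fun x => x) false).nodup_iff.mpr h
  exact (h1.and h2).imp (fun hab => lt_of_le_of_ne hab.1 hab.2)

theorem sum_filter_pos (vs : List Int) (h : ∀ v ∈ vs, 0 ≤ v) :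
    ((vs.filter (fun v => 0 < v)).sum) = vs.sum := by
  induction vs with
  | nil => rfl
  | cons v rest ih =>
    rw [List.filter_cons]
    have hv := h v (List.mem_cons_self ..)
    have ih' := ih (fun x hx => h x (List.mem_cons_of_mem _ hx))
    by_cases hp : 0 < v
    · rw [if_pos (by simpa using hp)]; simp [ih']
    · rw [if_neg (by simpa using hp)]; simp [ih']; omega

theorem prod_pyFact_filter_pos (vs : List Int) (h : ∀ v ∈ vs, 0 ≤ v) :
    ((vs.filter (fun v => 0 < v)).map pyFact).prod = (vs.map pyFact).prod := by
  induction vs with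
  | nil => rfl
  | cons v rest ih =>
    rw [List.filter_cons]
    have hv := h v (List.mem_cons_self ..)
    have ih' := ih (fun x hx => h x (List.mem_cons_of_mem _ hx))
    by_cases hp : 0 < v
    · rw [if_pos (by simpa using hp)]; simp [ih']
    · rw [if_neg (by simpa using hp)]
      have : v = 0 := by omega
      simp [ih', this, pyFact]

theorem csOf_canon_eq (ks : List String) (d : PySem.Dict String Int)
    (hks : ks.Pairwise (· < ·)) (hnd : d.keys.Nodup)
    (hcov : ∀ q ∈ d.items, (0:Int) < q.2 → q.1 ∈ ks) :
    csOf ks d = csCanon d := by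
  unfold csCanon
  refine (PySem.List.sorted_eq_of_perm_of_pairwise_lt (d.items.filter (fun q => decide (0 < q.2))) (csOf ks d) (fun q : String × Int => q.1) ?_ ?_).symm
  · -- csOf ks d ~ d.items.filter (0 < ·.2)
    have hnd1 : (csOf ks d).Nodup := by
      apply List.Nodup.filter
      apply List.Nodup.map ?_ hks.nodup
      intro a b hab
      simpa using congrArg Prod.fst hab
    have hnd2 : (d.items.filter (fun q => 0 < q.2)).Nodup := by
      apply List.Nodup.filter
      exact List.Nodup.of_map _ hnd
    have hmem : ∀ q, q ∈ csOf ks d ↔ q ∈ d.items.filter (fun q => 0 < q.2) := by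
      intro q
      unfold csOf
      simp only [List.mem_filter, List.mem_map]
      constructor
      · rintro ⟨⟨j, hj, rfl⟩, hpos⟩
        simp only at hpos
        have hpos' : (0:Int) < d.getD j 0 := by simpa using hpos
        have hsome : ∃ w, d.get? j = some w := by
          rw [PySem.Dict.getD_eq_get?_getD] at hpos'
          cases hg : d.get? j with
          | none => rw [hg] at hpos'; simp at hpos'
          | some w => exact ⟨w, rfl⟩
        obtain ⟨w, hw⟩ := hsome
        have : d.getD j 0 = w := by rw [PySem.Dict.getD_eq_get?_getD, hw]; rfl
        refine ⟨?_, hpos⟩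
        rw [this] at *
        exact PySem.Dict.mem_items_of_get?_eq_some d hw
      · rintro ⟨hq, hpos⟩
        refine ⟨⟨q.1, hcov q hq (by simpa using hpos), ?_⟩, hpos⟩
        have := PySem.Dict.getD_of_mem_items d (k := q.1) (v := q.2) ?_ hnd 0
        · rw [this]
        · exact (by simpa using hq)
    refine List.perm_of_nodup_nodup_toFinset_eq hnd1 hnd2 ?_
    ext q
    simp only [List.mem_toFinset]
    exact hmem q
  · -- pairwise by key
    apply List.Pairwise.filter
    rw [List.pairwise_map]
    exact hks

theorem base_items : ∀ (its : List (String × Int)),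
    ((its.map Prod.snd).sum = 1) → (∀ q ∈ its, (0:Int) ≤ q.2) → (its.map Prod.fst).Nodup →
    ∃ l, firstOne (its.map Prod.fst) (PySem.Dict.mk its) = some l ∧
      its.filter (fun q => 0 < q.2) = [(l, 1)] := by
  intro its
  induction its with
  | nil => intro h; simp at h
  | cons q rest ih =>
    obtain ⟨a, w⟩ := q
    intro hsum hnn hnd
    simp only [List.map_cons, List.sum_cons] at hsum
    have hrest : ∀ r ∈ rest, (0:Int) ≤ r.2 := fun r hr => hnn r (List.mem_cons_of_mem _ hr)
    have hrsum : (0:Int) ≤ (rest.map Prod.snd).sum := by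
      apply List.sum_nonneg
      intro x hx
      obtain ⟨r, hr, rfl⟩ := List.mem_map.mp hx
      exact hrest r hr
    have hw0 : (0:Int) ≤ w := hnn _ (List.mem_cons_self ..)
    simp only [List.map_cons, List.nodup_cons] at hnd
    have hget : (PySem.Dict.mk ((a, w) :: rest)).getD a 0 = w := by
      rw [PySem.Dict.getD_eq_get?_getD, PySem.Dict.get?_mk_cons, if_pos (by simp)]; rfl
    have hw01 : w = 0 ∨ w = 1 := by omega
    rcases hw01 with rfl | rfl
    · -- w = 0 : skip head
      have hcongr : firstOne (rest.map Prod.fst) (PySem.Dict.mk ((a, (0:Int)) :: rest))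
          = firstOne (rest.map Prod.fst) (PySem.Dict.mk rest) := by
        apply firstOne_congr
        intro j hj
        rw [PySem.Dict.get?_mk_cons, if_neg]
        simp only [beq_iff_eq]
        rintro rfl
        exact hnd.1 hj
      obtain ⟨l, hfo, hfil⟩ := ih (by omega) hrest hnd.2
      refine ⟨l, ?_, ?_⟩
      · rw [List.map_cons]
        simp only [firstOne]
        rw [hget, if_neg (by norm_num), hcongr]
        exact hfo
      · rw [List.filter_cons, if_neg (by simp)]; exact hfil
    · -- w = 1 : head is it, rest all zero
      have hz : ∀ r ∈ rest, r.2 = (0:Int) := by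
        intro r hr
        have hle : r.2 ≤ (rest.map Prod.snd).sum :=
          List.single_le_sum (by intro x hx; obtain ⟨r', hr', rfl⟩ := List.mem_map.mp hx; exact hrest r' hr') _ (List.mem_map_of_mem hr)
        -- rest sum = 0
        have h0 : (rest.map Prod.snd).sum = 0 := by omega
        have := hrest r hr
        omega
      refine ⟨a, ?_, ?_⟩
      · rw [List.map_cons]
        simp only [firstOne]
        rw [hget, if_pos rfl]
      · rw [List.filter_cons, if_pos (by norm_num)]
        rw [List.filter_eq_nil_iff.mpr (fun r hr => by simp [hz r hr])]

theorem floordiv_cancel (n e : Int) (hn : 0 < n) : PySem.Int.floordiv (n * e) n = e := by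
  rw [PySem.Int.floordiv_eq_ediv_of_pos hn]
  exact Int.mul_ediv_cancel_left e (by omega)

theorem pick_identity (d : PySem.Dict String Int) (l : String) (v : Int)
    (pre post : List (String × Int)) (hit : d.items = pre ++ (l, v) :: post)
    (hnn : ∀ q ∈ d.items, (0:Int) ≤ q.2) (hv : 0 < v) :
    MInt d * v = d.values.sum * (natM (((pre ++ (l, v - 1) :: post).map Prod.snd).map Int.toNat) : Int) := by
  classical
  set preN := ((pre.map Prod.snd).map Int.toNat) with hpreN
  set postN := ((post.map Prod.snd).map Int.toNat) with hpostN
  set c := v.toNat with hcdef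
  have hc : 0 < c := by omega
  set s := preN.sum + postN.sum with hs
  set P0 := ((preN.map Nat.factorial).prod * (postN.map Nat.factorial).prod) with hP0def
  have hP0 : 0 < P0 := by
    apply Nat.mul_pos <;>
    · apply List.prod_pos
      intro x hx
      obtain ⟨y, hy, rfl⟩ := List.mem_map.mp hx
      exact Nat.factorial_pos y
  have hvals : d.values = (pre.map Prod.snd) ++ v :: (post.map Prod.snd) := by
    simp [PySem.Dict.values, hit]
  -- full toNat list
  have hFL : d.values.map Int.toNat = preN ++ c :: postN := by
    rw [hvals]; simp [hpreN, hpostN, hcdef]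
  have hDL : ((pre ++ (l, v - 1) :: post).map Prod.snd).map Int.toNat = preN ++ (c - 1) :: postN := by
    simp [hpreN, hpostN]
    omega
  have hsumFL : (preN ++ c :: postN).sum = c + s := by simp [hs]; omega
  have hsumDL : (preN ++ (c - 1) :: postN).sum = c - 1 + s := by simp [hs]; omega
  have hprodFL : ((preN ++ c :: postN).map Nat.factorial).prod = Nat.factorial c * P0 := by
    simp [hP0def]; ring
  have hprodDL : ((preN ++ (c - 1) :: postN).map Nat.factorial).prod = Nat.factorial (c - 1) * P0 := by
    simp [hP0def]; ring
  have h1 := prodFact_dvd (preN ++ c :: postN)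
  rw [hsumFL, hprodFL] at h1
  have h2 := prodFact_dvd (preN ++ (c - 1) :: postN)
  rw [hsumDL, hprodDL] at h2
  have hkey := key_div c s P0 hc hP0 h1 h2
  have hnatFL : natM (d.values.map Int.toNat) = Nat.factorial (c + s) / (Nat.factorial c * P0) := by
    rw [natM, hFL, hsumFL, hprodFL]
  have hnatDL : natM (preN ++ (c - 1) :: postN) = Nat.factorial (c - 1 + s) / (Nat.factorial (c - 1) * P0) := by
    rw [natM, hsumDL, hprodDL]
  have hnn' : ∀ x ∈ d.values, (0:Int) ≤ x := by
    intro x hx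
    obtain ⟨q, hq, rfl⟩ := List.mem_map.mp hx
    exact hnn q hq
  have hsumcast : d.values.sum = ((c + s : Nat) : Int) := by
    rw [← sum_toNat_cast _ hnn', hFL, hsumFL]
  have hNat : natM (d.values.map Int.toNat) * c = (c + s) * natM (preN ++ (c - 1) :: postN) := by
    rw [hnatFL, hnatDL]; exact hkey
  rw [MInt, hDL, hsumcast, show v = ((c : Nat) : Int) by omega]
  exact_mod_cast hNat

theorem innerB_isSome (m n : Int) : ∀ (cs : List (String × Int)) (k : Int), cs ≠ [] →
    k ≤ (cs.map (fun q => PySem.Int.floordiv (m * q.2) n)).sum →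
    (innerB k m n cs).isSome := by
  intro cs
  induction cs with
  | nil => intro k h; exact absurd rfl h
  | cons q rest ih =>
    intro k _ hk
    obtain ⟨l, c⟩ := q
    simp only [List.map_cons, List.sum_cons] at hk
    simp only [innerB]
    by_cases hle : k ≤ PySem.Int.floordiv (m * c) n
    · rw [if_pos hle]; rfl
    · rw [if_neg hle]
      have hne : rest ≠ [] := by
        rintro rfl
        simp at hk
        omega
      have := ih (k - PySem.Int.floordiv (m * c) n) hne (by omega)
      cases hcase : innerB (k - PySem.Int.floordiv (m * c) n) m n rest with
      | none => rw [hcase] at this; simp at this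
      | some r => obtain ⟨l', p', k', cs'⟩ := r; simp

theorem sum_fd (n m : Int) (hn : 0 < n) : ∀ (cs : List (String × Int)),
    (∀ q ∈ cs, n ∣ (m * q.2)) →
    n * (cs.map (fun q => PySem.Int.floordiv (m * q.2) n)).sum = m * (cs.map Prod.snd).sum := by
  intro cs
  induction cs with
  | nil => simp
  | cons q rest ih =>
    intro h
    simp only [List.map_cons, List.sum_cons, Int.mul_add]
    rw [ih (fun r hr => h r (List.mem_cons_of_mem _ hr))]
    rw [PySem.Int.floordiv_eq_ediv_of_pos hn, Int.mul_ediv_cancel' (h q (List.mem_cons_self ..))]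

theorem sum_picks (d : PySem.Dict String Int) (ks : List String)
    (hks : ks.Pairwise (· < ·)) (hnd : d.keys.Nodup)
    (hnn : ∀ q ∈ d.items, (0:Int) ≤ q.2)
    (hcov : ∀ q ∈ d.items, (0:Int) < q.2 → q.1 ∈ ks)
    (hn : 1 ≤ d.values.sum) :
    ((csOf ks d).map (fun q => PySem.Int.floordiv (MInt d * q.2) d.values.sum)).sum = MInt d := by
  rw [csOf_canon_eq ks d hks hnd hcov]
  have hperm : (csCanon d).Perm (d.items.filter (fun q => 0 < q.2)) :=
    PySem.List.sorted_perm _ _ _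
  have hdvd : ∀ q ∈ csCanon d, d.values.sum ∣ (MInt d * q.2) := by
    intro q hq
    have hq' := hperm.mem_iff.mp hq
    have hqi : q ∈ d.items := List.mem_of_mem_filter hq'
    have hqpos : (0:Int) < q.2 := by
      have := List.of_mem_filter hq'
      simpa using this
    obtain ⟨a, w⟩ := q
    have hget : d.get? a = some w := PySem.Dict.get?_of_mem_items d hqi hnd
    obtain ⟨pre, post, hit, hpre, hpost⟩ := get?_split d a w hnd hget
    exact ⟨_, pick_identity d a w pre post hit hnn hqpos⟩
  have hsum2 : ((csCanon d).map Prod.snd).sum = d.values.sum := by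
    rw [(hperm.map Prod.snd).sum_eq]
    have : (d.items.filter (fun q => 0 < q.2)).map Prod.snd
        = d.values.filter (fun v => 0 < v) := by
      rw [PySem.Dict.values, List.filter_map]
      rfl
    rw [this, sum_filter_pos _ (by
      intro v hv
      obtain ⟨q, hq, rfl⟩ := List.mem_map.mp hv
      exact hnn q hq)]
  have := sum_fd d.values.sum (MInt d) (by omega) (csCanon d) hdvd
  rw [hsum2] at this
  have hne : d.values.sum ≠ 0 := by omega
  exact mul_left_cancel₀ hne (by rw [this]; ring)

-- ---------- the scan correspondence ----------

theorem scan (fa : Nat) (n m : Int) (hn : 1 ≤ n) :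
    ∀ (ks : List String) (d : PySem.Dict String Int) (kk t : Int),
    d.keys.Nodup → (∀ q ∈ d.items, (0:Int) ≤ q.2) → ks.Nodup →
    (∀ l ∈ ks, (d.get? l).isSome) →
    d.values.sum = n → MInt d = m →
    (innerB (kk - t) m n (csOf ks d) = none ∧ innerA (goA fa) ks kk d t = "") ∨
    (∃ l p k' cs' d',
      innerB (kk - t) m n (csOf ks d) = some (l, p, k', cs') ∧
      innerA (goA fa) ks kk d t = l ++ goA fa k' d' ∧
      d'.keys.Nodup ∧ (∀ q ∈ d'.items, (0:Int) ≤ q.2) ∧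
      d'.values.sum = n - 1 ∧ MInt d' = p ∧ k' ≤ p ∧ cs' = csOf ks d' ∧
      (∀ j ∈ d'.keys, j ∈ d.keys) ∧ (∀ j, j ∉ ks → d'.get? j = d.get? j)) := by
  intro ks
  induction ks with
  | nil =>
    intro d kk t _ _ _ _ _ _
    left
    exact ⟨rfl, rfl⟩
  | cons l ls ih =>
    intro d kk t hnd hnn hksnd hksome hsum hM
    obtain ⟨v, hv⟩ := Option.isSome_iff_exists.mp (hksome l (List.mem_cons_self ..))
    have hgetD : d.getD l 0 = v := by rw [PySem.Dict.getD_eq_get?_getD, hv]; rfl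
    have hmem : (l, v) ∈ d.items := PySem.Dict.mem_items_of_get?_eq_some d hv
    have hv0 : (0:Int) ≤ v := hnn _ hmem
    obtain ⟨pre, post, hit, hpre, hpost⟩ := get?_split d l v hnd hv
    have hlnotls : l ∉ ls := (List.nodup_cons.mp hksnd).1
    have hlsnd : ls.Nodup := (List.nodup_cons.mp hksnd).2
    simp only [innerA, hgetD]
    by_cases hz : v = 0
    · -- skip-and-delete branch
      subst hz
      rw [if_pos rfl]
      have hcs : csOf (l :: ls) d = csOf ls d := by
        simp [csOf, hgetD]
      have heri : (d.erase l).items = pre ++ post :=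
        erase_items_of_split d l 0 pre post hit hpre hpost
      have hnd' : (d.erase l).keys.Nodup := by
        rw [keys_erase_filter]; exact hnd.filter _
      have hnn' : ∀ q ∈ (d.erase l).items, (0:Int) ≤ q.2 := by
        intro q hq
        rw [heri] at hq
        exact hnn q (by rw [hit]; rcases List.mem_append.mp hq with h | h
                        · exact List.mem_append_left _ h
                        · exact List.mem_append_right _ (List.mem_cons_of_mem _ h))
      have hget' : ∀ j ∈ ls, (d.erase l).get? j = d.get? j := by
        intro j hj
        exact get?_erase_of_ne d l j (fun hje => hlnotls (hje ▸ hj))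
      have hksome' : ∀ j ∈ ls, ((d.erase l).get? j).isSome := by
        intro j hj
        rw [hget' j hj]
        exact hksome j (List.mem_cons_of_mem _ hj)
      have hsum' : (d.erase l).values.sum = n := by
        have h1 : d.values.sum = ((pre.map Prod.snd).sum + (0 + (post.map Prod.snd).sum)) := by
          simp [PySem.Dict.values, hit]
        have h2 : (d.erase l).values.sum = ((pre.map Prod.snd).sum + (post.map Prod.snd).sum) := by
          simp [PySem.Dict.values, heri]
        omega
      have hM' : MInt (d.erase l) = m := by
        rw [← hM]
        simp [MInt, natM, PySem.Dict.values, heri, hit]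
      have hcse : csOf ls (d.erase l) = csOf ls d := csOf_congr ls d (d.erase l) hget'
      rcases ih (d.erase l) kk t hnd' hnn' hlsnd hksome' hsum' hM' with ⟨hB, hA⟩ | ⟨l', p, k', cs', d', hB, hA, c1, c2, c3, c4, c5, c6, c7, c8⟩
      · left
        rw [hcs, ← hcse]
        exact ⟨hB, hA⟩
      · right
        refine ⟨l', p, k', cs', d', ?_, hA, c1, c2, c3, c4, c5, ?_, ?_, ?_⟩
        · rw [hcs, ← hcse]; exact hB
        · -- cs' = csOf (l :: ls) d'
          have hnone : d'.get? l = none := by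
            rw [c8 l hlnotls]
            have hfind : List.find? (fun p => p.1 == l)
                (d.items.filter (fun p => !(p.1 == l))) = none :=
              List.find?_eq_none.mpr (fun q hq => by simpa using List.of_mem_filter hq)
            simp [PySem.Dict.get?, PySem.Dict.erase, hfind]
          have : d'.getD l 0 = 0 := by rw [PySem.Dict.getD_eq_get?_getD, hnone]; rfl
          rw [c6]
          simp [csOf, this]
        · intro j hj
          have h1 := c7 j hj
          rw [keys_erase_filter] at h1
          exact List.mem_of_mem_filter h1
        · intro j hj
          have hjl : j ≠ l := fun hje => hj (hje ▸ List.mem_cons_self ..)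
          have hjls : j ∉ ls := fun hje => hj (List.mem_cons_of_mem _ hje)
          rw [c8 j hjls]
          exact get?_erase_of_ne d l j hjl
    · -- positive count: candidate letter
      rw [if_neg hz]
      have hvpos : (0:Int) < v := by omega
      set d' := d.insert l (v - 1) with hd'def
      have hit' : d'.items = pre ++ (l, v - 1) :: post :=
        insert_existing_items d l v (v - 1) pre post hit hpre hpost
      have hkeys' : d'.keys = d.keys := by
        simp [PySem.Dict.keys, hit', hit]
      have hnd' : d'.keys.Nodup := by rw [hkeys']; exact hnd
      have hnn' : ∀ q ∈ d'.items, (0:Int) ≤ q.2 := by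
        intro q hq
        rw [hit'] at hq
        rcases List.mem_append.mp hq with h | h
        · exact hnn q (by rw [hit]; exact List.mem_append_left _ h)
        · rcases List.mem_cons.mp h with rfl | h
          · simp; omega
          · exact hnn q (by rw [hit]; exact List.mem_append_right _ (List.mem_cons_of_mem _ h))
      have hsum' : d'.values.sum = n - 1 := by
        have h1 : d.values.sum = ((pre.map Prod.snd).sum + (v + (post.map Prod.snd).sum)) := by
          simp [PySem.Dict.values, hit]
        have h2 : d'.values.sum = ((pre.map Prod.snd).sum + ((v - 1) + (post.map Prod.snd).sum)) := by
          simp [PySem.Dict.values, hit']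
        omega
      have hgetD' : d'.getD l 0 = v - 1 := by
        rw [PySem.Dict.getD_eq_get?_getD, PySem.Dict.get?_insert_self]; rfl
      have hget'ne : ∀ j, j ≠ l → d'.get? j = d.get? j := by
        intro j hj
        exact PySem.Dict.get?_insert_of_ne d (v - 1) hj
      have hMd' : MInt d' = (natM (((pre ++ (l, v - 1) :: post).map Prod.snd).map Int.toNat) : Int) := by
        rw [MInt, PySem.Dict.values, hit']
      have hpick := pick_identity d l v pre post hit hnn hvpos
      rw [← hMd', hsum, hM] at hpick
      -- p as computed by A equals MInt d'
      have hpA : PySem.Int.floordiv (pyFact d'.values.sum) ((d'.values.map pyFact).prod) = MInt d' :=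
        pA_eq_MInt d' hnn'
      -- p as computed by B equals MInt d'
      have hpB : PySem.Int.floordiv (m * v) n = MInt d' := by
        rw [hpick]
        exact floordiv_cancel n (MInt d') (by omega)
      have hcs : csOf (l :: ls) d = (l, v) :: csOf ls d := by
        simp [csOf, hgetD, hvpos]
      rw [hcs]
      by_cases hbr : kk - t ≤ PySem.Int.floordiv (m * v) n
      · -- picked
        have hInner : innerB (kk - t) m n ((l, v) :: csOf ls d)
            = some (l, PySem.Int.floordiv (m * v) n, kk - t,
                if v = 1 then csOf ls d else (l, v - 1) :: csOf ls d) := by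
          simp only [innerB]
          rw [if_pos hbr]
        rw [hInner]
        right
        refine ⟨l, PySem.Int.floordiv (m * v) n, kk - t, _, d', rfl, ?_, hnd', hnn', hsum', hpB.symm, hbr, ?_, ?_, ?_⟩
        · rw [hpA, if_pos (show kk ≤ t + MInt d' by
            have h := hbr; rw [hpB] at h; omega)]
        · -- cs' = csOf (l :: ls) d'
          have hmapeq : ls.map (fun j => (j, d'.getD j 0)) = ls.map (fun j => (j, d.getD j 0)) :=
            List.map_congr_left (fun j hj => by
              rw [PySem.Dict.getD_eq_get?_getD, PySem.Dict.getD_eq_get?_getD,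
                hget'ne j (fun hje => hlnotls (hje ▸ hj))])
          by_cases h1 : v = 1
          · rw [if_pos h1]
            have hz' : d'.getD l 0 = 0 := by rw [hgetD']; omega
            simp [csOf, hz', hmapeq]
          · rw [if_neg h1]
            have hpos' : (0:Int) < v - 1 := by omega
            simp [csOf, hgetD', hmapeq]
            rw [List.filter_cons, if_pos (by simpa using hpos')]
        · intro j hj; rw [hkeys'] at hj; exact hj
        · intro j hj
          exact hget'ne j (fun hje => hj (hje ▸ List.mem_cons_self ..))
      · -- skipped: count restored, move on
        have hrestore : d'.insert l (d'.getD l 0 + 1) = d := by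
          rw [hgetD', hd'def, PySem.Dict.insert_insert_self, show v - 1 + 1 = v by omega]
          exact insert_self d l v hnd hv
        rw [hpA, if_neg (show ¬ kk ≤ t + MInt d' by
          have h := hbr; rw [hpB] at h; omega), hrestore]
        rcases ih d kk (t + MInt d') hnd hnn hlsnd
            (fun j hj => hksome j (List.mem_cons_of_mem _ hj)) hsum hM with
          ⟨hB, hA⟩ | ⟨l', p, k', cs', d'', hB, hA, c1, c2, c3, c4, c5, c6, c7, c8⟩
        · left
          have hB' : innerB (kk - t - PySem.Int.floordiv (m * v) n) m n (csOf ls d) = none := by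
            rw [show kk - t - PySem.Int.floordiv (m * v) n = kk - (t + MInt d') by
              rw [hpB]; omega]
            exact hB
          refine ⟨?_, hA⟩
          simp only [innerB]
          rw [if_neg hbr, hB']
        · right
          have hB' : innerB (kk - t - PySem.Int.floordiv (m * v) n) m n (csOf ls d)
              = some (l', p, k', cs') := by
            rw [show kk - t - PySem.Int.floordiv (m * v) n = kk - (t + MInt d') by
              rw [hpB]; omega]
            exact hB
          refine ⟨l', p, k', (l, v) :: cs', d'', ?_, hA, c1, c2, c3, c4, c5, ?_, c7, ?_⟩
          · simp only [innerB]
            rw [if_neg hbr, hB']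
          · -- (l, v) :: cs' = csOf (l :: ls) d''
            have hvl : d''.get? l = d.get? l := c8 l hlnotls
            have hvv : d''.getD l 0 = v := by rw [PySem.Dict.getD_eq_get?_getD, hvl, hv]; rfl
            rw [c6]
            simp [csOf, hvv, hvpos]
          · intro j hj
            exact c8 j (fun hje => hj (List.mem_cons_of_mem _ hje))

-- ---------- n = 1 and csCanon sum helpers ----------

theorem csCanon_sum (d : PySem.Dict String Int) (hnn : ∀ q ∈ d.items, (0:Int) ≤ q.2) :
    ((csCanon d).map Prod.snd).sum = d.values.sum := by
  have hperm : (csCanon d).Perm (d.items.filter (fun q => 0 < q.2)) :=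
    PySem.List.sorted_perm _ _ _
  rw [(hperm.map Prod.snd).sum_eq]
  have : (d.items.filter (fun q => 0 < q.2)).map Prod.snd
      = d.values.filter (fun v => 0 < v) := by
    rw [PySem.Dict.values, List.filter_map]
    rfl
  rw [this, sum_filter_pos _ (by
    intro v hv
    obtain ⟨q, hq, rfl⟩ := List.mem_map.mp hv
    exact hnn q hq)]

theorem mainBase (fa₀ : Nat) (d : PySem.Dict String Int) (k : Int) (fb : Nat) (out : String)
    (hnd : d.keys.Nodup) (hnn : ∀ q ∈ d.items, (0:Int) ≤ q.2)
    (hone : d.values.sum = 1) (hfb : d.values.sum.toNat ≤ fb) :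
    goB fb d.values.sum (MInt d) k (csCanon d) out = out ++ goA (fa₀ + 1) k d := by
  obtain ⟨l, hfo, hfil⟩ := base_items d.items (by exact hone) hnn (by exact hnd)
  have hcanon : csCanon d = [(l, 1)] := by
    rw [csCanon, hfil]
    exact PySem.List.sorted_eq_self_of_pairwise _ _ (List.pairwise_singleton _ _)
  obtain ⟨fb', rfl⟩ : ∃ fb', fb = fb' + 1 := by
    refine ⟨fb - 1, ?_⟩; omega
  simp only [goB]
  rw [if_neg (by omega : ¬ (1:Int) < d.values.sum), hcanon]
  simp only [goA]
  rw [if_pos hone]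
  rw [show firstOne d.keys d = some l from hfo]

-- ---------- the main loop correspondence ----------

theorem mainLoop : ∀ (fa : Nat) (d : PySem.Dict String Int) (k : Int) (fb : Nat) (out : String),
    d.keys.Nodup → (∀ q ∈ d.items, (0:Int) ≤ q.2) → 1 ≤ d.values.sum →
    d.values.sum.toNat ≤ fa + 1 → d.values.sum.toNat ≤ fb →
    (d.values.sum = 1 ∨ k ≤ MInt d) →
    goB fb d.values.sum (MInt d) k (csCanon d) out = out ++ goA (fa + 1) k d := by
  intro fa
  induction fa with
  | zero =>
    intro d k fb out hnd hnn hsum1 hfa hfb hor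
    have hone : d.values.sum = 1 := by omega
    exact mainBase 0 d k fb out hnd hnn hone hfb
  | succ fa' ih =>
    intro d k fb out hnd hnn hsum1 hfa hfb hor
    by_cases hone : d.values.sum = 1
    · exact mainBase (fa' + 1) d k fb out hnd hnn hone hfb
    · have hn2 : 2 ≤ d.values.sum := by omega
      set n := d.values.sum with hndef
      set m := MInt d with hmdef
      have hkm : k ≤ m := by rcases hor with h | h; omega; exact h
      set ks := PySem.List.sorted d.keys (fun x => x) false with hksdef
      have hkspw : ks.Pairwise (· < ·) := sorted_keys_pairwise d.keys hnd
      have hksnd : ks.Nodup := (PySem.List.sorted_perm d.keys (fun x => x) false).nodup_iff.mpr hnd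
      have hcov : ∀ q ∈ d.items, (0:Int) < q.2 → q.1 ∈ ks := by
        intro q hq _
        rw [hksdef, PySem.List.mem_sorted]
        exact List.mem_map_of_mem hq
      have hksome : ∀ l ∈ ks, (d.get? l).isSome := by
        intro l hl
        rw [hksdef, PySem.List.mem_sorted] at hl
        have hc : d.contains l = true := (PySem.Dict.contains_iff_mem_keys d l).mpr hl
        rw [PySem.Dict.contains_eq_isSome_get?] at hc
        exact hc
      have hcanon : csOf ks d = csCanon d := csOf_canon_eq ks d hkspw hnd hcov
      -- unfold one step of goB
      obtain ⟨fb', rfl⟩ : ∃ fb', fb = fb' + 1 := by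
        refine ⟨fb - 1, ?_⟩; omega
      have hfb' : (n - 1).toNat ≤ fb' := by omega
      -- unfold one step of goA
      have hgoA : goA (fa' + 1 + 1) k d
          = innerA (goA (fa' + 1)) ks k d 0 := by
        simp only [goA]
        rw [if_neg hone]
      rcases scan (fa' + 1) n m (by omega) ks d k 0 hnd hnn hksnd hksome hndef.symm hmdef.symm with
        ⟨hB, hA⟩ | ⟨l, p, k', cs', d', hB, hA, c1, c2, c3, c4, c5, c6, c7, c8⟩
      · -- impossible: k ≤ m guarantees a pick
        exfalso
        have hsumpk := sum_picks d ks hkspw hnd hnn hcov (by omega)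
        have hcsne : csOf ks d ≠ [] := by
          intro hemp
          have := csCanon_sum d hnn
          rw [← hcanon, hemp] at this
          simp at this
          omega
        have := innerB_isSome m n (csOf ks d) (k - 0) hcsne (by
          rw [hsumpk]
          omega)
        rw [hB] at this
        simp at this
      · rw [sub_zero] at hB
        rw [← hcanon]
        simp only [goB]
        rw [if_pos (by omega), hB]
        have hcanon' : cs' = csCanon d' := by
          rw [c6]
          refine csOf_canon_eq ks d' hkspw c1 ?_
          intro q hq _
          rw [hksdef, PySem.List.mem_sorted]
          exact c7 q.1 (List.mem_map_of_mem hq)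
        have hih := ih d' k' fb' (out ++ l) c1 c2 (by omega) (by omega) (by omega)
          (Or.inr (by rw [← c4] at c5; exact c5))
        rw [hcanon', show n - 1 = d'.values.sum from c3.symm, show p = MInt d' from c4.symm]
        show goB fb' d'.values.sum (MInt d') k' (csCanon d') (out ++ l)
            = out ++ goA (fa' + 1 + 1) k d
        rw [hih, hgoA, hA, String.append_assoc]

-- ===== VERDICT (by name: the statement is the Claim_ definition above) =====
theorem f_spec : Claim_equal_f := by
  intro k D _ hpre
  obtain ⟨hnn, hsum1, hor⟩ := hpre
  show f k D = f_alt k D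
  unfold f f_alt
  simp only []
  set d := PySem.Dict.ofList D with hd
  have hnd : d.keys.Nodup := PySem.Dict.nodup_keys_ofList D
  have hbridge : (PySem.List.sorted d.items (fun p => p.1) false).filter (fun p => !(p.2 == 0))
      = (PySem.List.sorted d.items (fun p => p.1) false).filter (fun p => 0 < p.2) := by
    refine List.filter_congr ?_
    intro q hq
    have hq' : q ∈ d.items := (PySem.List.mem_sorted ..).mp hq
    have h0 := hnn q hq'
    by_cases hz : q.2 = 0
    · simp [hz]
    · simp [hz, show (0:Int) < q.2 by omega]
  rw [hbridge]
  set csAlt := (PySem.List.sorted d.items (fun p => p.1) false).filter (fun p => 0 < p.2) with hcsAltDef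
  have hperm0 : (PySem.List.sorted d.items (fun p => p.1) false).Perm d.items :=
    PySem.List.sorted_perm _ _ _
  have hpairs : (PySem.List.sorted d.items (fun p => p.1) false).Pairwise (fun a b => a.1 < b.1) := by
    have h1 : (PySem.List.sorted d.items (fun p => p.1) false).Pairwise (fun a b => a.1 ≤ b.1) :=
      PySem.List.sorted_pairwise _ _
    have h2 : ((PySem.List.sorted d.items (fun p => p.1) false).map Prod.fst).Nodup :=
      ((hperm0.map Prod.fst).nodup_iff).mpr hnd
    exact (h1.and (List.pairwise_map.mp h2)).imp (fun h => lt_of_le_of_ne h.1 h.2)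
  have hcsalt : csAlt = csCanon d := by
    unfold csCanon
    exact (PySem.List.sorted_eq_of_perm_of_pairwise_lt _ csAlt
      (fun q : String × Int => q.1) (hperm0.filter _) (hpairs.filter _)).symm
  have hvnn : ∀ v ∈ d.values, (0:Int) ≤ v := by
    intro v hv
    obtain ⟨q, hq, rfl⟩ := List.mem_map.mp hv
    exact hnn q hq
  have hnalt : (csAlt.map (fun p => p.2)).sum = d.values.sum := by
    rw [hcsalt]
    exact csCanon_sum d hnn
  have hmalt : (csAlt.map (fun p => pyFact p.2)).prod = (d.values.map pyFact).prod := by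
    rw [hcsalt]
    have hperm : (csCanon d).Perm (d.items.filter (fun q => 0 < q.2)) :=
      PySem.List.sorted_perm _ _ _
    rw [(hperm.map (fun p => pyFact p.2)).prod_eq]
    have hstep : (d.items.filter (fun q => 0 < q.2)).map (fun p => pyFact p.2)
        = (d.values.filter (fun v => 0 < v)).map pyFact := by
      have : (d.items.filter (fun q => 0 < q.2)).map Prod.snd
          = d.values.filter (fun v => 0 < v) := by
        rw [PySem.Dict.values, List.filter_map]
        rfl
      rw [← this, List.map_map]
      rfl
    rw [hstep, prod_pyFact_filter_pos _ hvnn]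
  have hfuel : (d.values.map Int.toNat).sum = d.values.sum.toNat := by
    have := sum_toNat_cast d.values hvnn
    omega
  have hmain := mainLoop ((d.values.map Int.toNat).sum) d k
    ((csAlt.map (fun p : String × Int => p.2)).sum.toNat) "" hnd hnn hsum1 (by omega)
    (by rw [hnalt]) hor
  rw [hnalt, hmalt, hcsalt]
  rw [show PySem.Int.floordiv (pyFact d.values.sum) ((d.values.map pyFact).prod) = MInt d
    from pA_eq_MInt d hnn]
  rw [hnalt] at hmain
  rw [hmain, String.empty_append]
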